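-- pv_equiv track=rewrite | github.com/kzxyo/skidcity | VILE UPDATED/utilities/uwuify.py | _do_yu
-- ===== SOURCE A (Python) =====
-- YU = str.maketrans({'u': 'yu', 'U': 'yU'})
--
-- def _do_yu(entry: str) -> str:
--
--     final = list()
--     for word in entry.split():
--         if word:
--             final.append(word[0] + word[1:].translate(YU))
--         else:
--             final.append(' ')
--
--     return ' '.join(final)
-- ===== SOURCE B (Python) =====
-- def _do_yu(entry: str) -> str:
--     normalized = ' '.join(entry.split())
--     out = []
--     prev = ' '
--     for c in normalized:
--         if c in 'uU' and prev != ' ':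
--             out.append('y')
--         out.append(c)
--         prev = c
--     return ''.join(out)
-- ===== Notes on version B (the rewrite author's own statement) =====
-- stated objective: alternative
-- what changed: Replaces the per-word loop with head-slicing and a translation table by a single left-to-right pass over the whitespace-normalized string that inserts 'y' before any u/U whose previous character is not a space.
import Mathlib
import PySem

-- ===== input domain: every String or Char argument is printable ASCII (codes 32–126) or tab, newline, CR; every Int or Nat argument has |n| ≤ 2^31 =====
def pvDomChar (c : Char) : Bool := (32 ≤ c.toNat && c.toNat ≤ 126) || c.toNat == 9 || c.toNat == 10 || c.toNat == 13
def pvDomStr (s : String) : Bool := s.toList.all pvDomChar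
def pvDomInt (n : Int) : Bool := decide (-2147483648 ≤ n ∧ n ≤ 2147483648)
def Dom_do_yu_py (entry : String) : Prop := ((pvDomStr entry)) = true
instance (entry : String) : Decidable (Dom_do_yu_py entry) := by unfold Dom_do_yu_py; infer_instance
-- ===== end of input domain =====

-- B replaces A's per-word slicing/translation by one pass over the normalized string; alternative algorithm, same cost.

-- ===== PORT A =====
-- the YU translation table applied to one character: 'u' -> "yu", 'U' -> "yU"
def trYU (c : Char) : List Char :=
  if c = 'u' then ['y', 'u'] else if c = 'U' then ['y', 'U'] else [c]

-- the loop body: word[0] + word[1:].translate(YU) if word else ' '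
def wordA (word : List Char) : List Char :=
  match word with
  | [] => [' ']
  | c :: rest => c :: rest.flatMap trYU

def do_yu_py (entry : String) : String :=
  String.ofList (PySem.Chars.join [' ']
    ((PySem.Chars.split₀ entry.toList).foldl (fun acc word => acc ++ [wordA word]) []))

-- ===== PORT B =====
-- one pass: emit 'y' before u/U whenever the previous character is not a space
def passYu : Char → List Char → List Char
  | _, [] => []
  | prev, c :: cs =>
    (if (c = 'u' ∨ c = 'U') ∧ prev ≠ ' ' then ['y', c] else [c]) ++ passYu c cs

def do_yu_py_alt (entry : String) : String :=
  String.ofList (passYu ' ' (PySem.Chars.join [' '] (PySem.Chars.split₀ entry.toList)))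

-- ===== PRECONDITION & SPEC =====
def Spec_do_yu_py (entry : String) (out : String) : Prop := out = do_yu_py_alt entry
instance (entry : String) (out : String) : Decidable (Spec_do_yu_py entry out) := by unfold Spec_do_yu_py; infer_instance

-- ===== CLAIM (what is proved, stated in full; the proofs are below) =====
def Claim_equal_do_yu_py : Prop := ∀ (entry : String), Dom_do_yu_py entry → Spec_do_yu_py entry (do_yu_py entry)

-- ===== LEMMAS AND PROOFS =====

-- every piece returned by split₀ is nonempty and contains no whitespace character
lemma split₀_go_pieces (s : List Char) :
    ∀ (cur : List Char) (acc : List (List Char)),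
      (∀ c ∈ cur, PySem.Chars.isspace c = false) →
      (∀ w ∈ acc, w ≠ [] ∧ ∀ c ∈ w, PySem.Chars.isspace c = false) →
      ∀ w ∈ PySem.Chars.split₀.go s cur acc,
        w ≠ [] ∧ ∀ c ∈ w, PySem.Chars.isspace c = false := by
  induction s with
  | nil =>
    intro cur acc hcur hacc w hw
    simp only [PySem.Chars.split₀.go] at hw
    split at hw
    · exact hacc w (List.mem_reverse.mp hw)
    · rw [List.mem_reverse, List.mem_cons] at hw
      rcases hw with rfl | hw
      · rename_i hne
        refine ⟨fun h => hne ?_, fun c hc => hcur c (List.mem_reverse.mp hc)⟩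
        simp [List.reverse_eq_nil_iff.mp h]
      · exact hacc w hw
  | cons a s ih =>
    intro cur acc hcur hacc w hw
    simp only [PySem.Chars.split₀.go] at hw
    split at hw
    · split at hw
      · exact ih [] acc (by simp) hacc w hw
      · refine ih [] (cur.reverse :: acc) (by simp) ?_ w hw
        intro v hv
        rcases List.mem_cons.mp hv with rfl | hv
        · rename_i hne
          refine ⟨fun h => hne ?_, fun c hc => hcur c (List.mem_reverse.mp hc)⟩
          simp [List.reverse_eq_nil_iff.mp h]
        · exact hacc v hv
    · refine ih (a :: cur) acc ?_ hacc w hw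
      intro c hc
      rcases List.mem_cons.mp hc with rfl | hc
      · rename_i hns; simpa using hns
      · exact hcur c hc

lemma split₀_pieces (s : List Char) :
    ∀ w ∈ PySem.Chars.split₀ s, w ≠ [] ∧ ∀ c ∈ w, PySem.Chars.isspace c = false := by
  simpa [PySem.Chars.split₀] using split₀_go_pieces s [] [] (by simp) (by simp)

lemma nonspace_ne_space {c : Char} (h : PySem.Chars.isspace c = false) : c ≠ ' ' := by
  intro h'; subst h'; simp [PySem.Chars.isspace] at h

-- B's pass on a word followed by a space equals the translated word, then the space, then a fresh pass
lemma pass_word_cont (cs : List Char) :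
    ∀ (prev : Char) (ys : List Char), prev ≠ ' ' →
      (∀ c ∈ cs, PySem.Chars.isspace c = false) →
      passYu prev (cs ++ ' ' :: ys) = cs.flatMap trYU ++ ' ' :: passYu ' ' ys := by
  induction cs with
  | nil =>
    intro prev ys _ _
    simp [passYu]
  | cons c cs ih =>
    intro prev ys hprev hcs
    have hc : PySem.Chars.isspace c = false := hcs c (List.mem_cons_self ..)
    have hrest : ∀ x ∈ cs, PySem.Chars.isspace x = false :=
      fun x hx => hcs x (List.mem_cons_of_mem _ hx)
    simp only [List.cons_append, passYu, ih c ys (nonspace_ne_space hc) hrest,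
      List.flatMap_cons]
    by_cases h : c = 'u'
    · simp [trYU, h, hprev]
    · by_cases h' : c = 'U' <;> simp [trYU, h, h', hprev]

-- B's pass on a trailing word is the translated word
lemma pass_word (cs : List Char) :
    ∀ (prev : Char), prev ≠ ' ' →
      (∀ c ∈ cs, PySem.Chars.isspace c = false) →
      passYu prev cs = cs.flatMap trYU := by
  induction cs with
  | nil => intro prev _ _; simp [passYu]
  | cons c cs ih =>
    intro prev hprev hcs
    have hc : PySem.Chars.isspace c = false := hcs c (List.mem_cons_self ..)
    have hrest : ∀ x ∈ cs, PySem.Chars.isspace x = false :=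
      fun x hx => hcs x (List.mem_cons_of_mem _ hx)
    simp only [passYu, ih c (nonspace_ne_space hc) hrest]
    by_cases h : c = 'u'
    · simp [trYU, h, hprev]
    · by_cases h' : c = 'U' <;> simp [trYU, h, h', hprev]

-- the key correspondence: B's pass over the joined words equals the join of A's per-word results
lemma pass_join (words : List (List Char)) :
    (∀ w ∈ words, w ≠ [] ∧ ∀ c ∈ w, PySem.Chars.isspace c = false) →
    passYu ' ' (PySem.Chars.join [' '] words) =
      PySem.Chars.join [' '] (words.map wordA) := by
  induction words with
  | nil => intro _; rfl
  | cons w ws ih =>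
    intro h
    have hw := h w (List.mem_cons_self ..)
    have hws : ∀ v ∈ ws, v ≠ [] ∧ ∀ c ∈ v, PySem.Chars.isspace c = false :=
      fun v hv => h v (List.mem_cons_of_mem _ hv)
    obtain ⟨c, cs, rfl⟩ := List.exists_cons_of_ne_nil hw.1
    have hc : PySem.Chars.isspace c = false := hw.2 c (List.mem_cons_self ..)
    have hcs : ∀ x ∈ cs, PySem.Chars.isspace x = false :=
      fun x hx => hw.2 x (List.mem_cons_of_mem _ hx)
    have hfirst : ¬ ((c = 'u' ∨ c = 'U') ∧ ' ' ≠ ' ') := by simp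
    cases ws with
    | nil =>
      show passYu ' ' ([' '].intercalate [c :: cs]) = [' '].intercalate [wordA (c :: cs)]
      simp only [List.intercalate, List.intersperse_single, List.flatten,
        List.append_eq, List.append_nil, passYu]
      rw [if_neg hfirst, pass_word cs c (nonspace_ne_space hc) hcs]
      simp [wordA]
    | cons w' ws' =>
      rw [PySem.Chars.join_cons_cons]
      simp only [List.append_assoc, List.cons_append, List.nil_append, passYu]
      rw [if_neg hfirst,
        pass_word_cont cs c (PySem.Chars.join [' '] (w' :: ws')) (nonspace_ne_space hc) hcs,
        ih hws]
      rw [show (((c :: cs) :: w' :: ws').map wordA) = wordA (c :: cs) :: wordA w' :: ws'.map wordA from rfl,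
        PySem.Chars.join_cons_cons]
      simp [wordA]

-- ===== VERDICT (by name: the statement is the Claim_ definition above) =====
theorem do_yu_py_spec : Claim_equal_do_yu_py := by
  intro entry _
  unfold Spec_do_yu_py do_yu_py do_yu_py_alt
  rw [PySem.List.foldl_append_singleton_eq_map, List.nil_append]
  exact congrArg String.ofList
    (pass_join (PySem.Chars.split₀ entry.toList) (split₀_pieces entry.toList)).symm
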